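-- pv_equiv track=rewrite | github.com/salsik/trico | src/uiflow/repr/serialize.py | serialize_screen
-- ===== SOURCE A (Python) =====
-- from typing import Any, Dict, List, Tuple
--
-- def serialize_screen(
--     pairs: List[Tuple[str, str]],
--     max_elems: int = 200,
-- ) -> str:
--     """
--     Produce compact, normalized text for text-embedding / SBERT.
--     Dedupes (type,text) while preserving order; truncates length by element count.
--     """
--     seen = set()
--     lines: List[str] = ["UI_SCREEN"]
--     for t, s in pairs:
--         t2 = t.split(".")[-1].strip()
--         key = (t2, s)
--         if key in seen:
--             continue
--         seen.add(key)
--         lines.append(f"{t2}: {s}" if s else f"{t2}")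
--         if len(lines) - 1 >= max_elems:
--             break
--     return "\n".join(lines)
-- ===== SOURCE B (Python) =====
-- def serialize_screen(pairs, max_elems=200):
--     norm = [(t.split(".")[-1].strip(), s) for t, s in pairs]
--
--     def emit(i, budget):
--         if i == len(norm) or budget <= 0:
--             return []
--         p = norm[i]
--         if p in norm[:i]:
--             return emit(i + 1, budget)
--         line = f"{p[0]}: {p[1]}" if p[1] else p[0]
--         return [line] + emit(i + 1, budget - 1)
--
--     return "\n".join(["UI_SCREEN"] + emit(0, max_elems))
-- ===== Notes on version B (the rewrite author's own statement) =====
-- stated objective: alternative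
-- what changed: Replaces the fused single pass with an inline seen-set and early break by a normalize pass followed by a recursive emitter with an explicit budget that dedupes by membership test against the prefix norm[:i] (no set, no break).
-- outside the precondition, e.g. on serialize_screen([('a.b', 'x')], 0): A returns 'UI_SCREEN\nb: x', B returns 'UI_SCREEN'; on serialize_screen([('a', 'x'), ('b', 'y')], -2): A returns 'UI_SCREEN\na: x', B returns 'UI_SCREEN'
import Mathlib
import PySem

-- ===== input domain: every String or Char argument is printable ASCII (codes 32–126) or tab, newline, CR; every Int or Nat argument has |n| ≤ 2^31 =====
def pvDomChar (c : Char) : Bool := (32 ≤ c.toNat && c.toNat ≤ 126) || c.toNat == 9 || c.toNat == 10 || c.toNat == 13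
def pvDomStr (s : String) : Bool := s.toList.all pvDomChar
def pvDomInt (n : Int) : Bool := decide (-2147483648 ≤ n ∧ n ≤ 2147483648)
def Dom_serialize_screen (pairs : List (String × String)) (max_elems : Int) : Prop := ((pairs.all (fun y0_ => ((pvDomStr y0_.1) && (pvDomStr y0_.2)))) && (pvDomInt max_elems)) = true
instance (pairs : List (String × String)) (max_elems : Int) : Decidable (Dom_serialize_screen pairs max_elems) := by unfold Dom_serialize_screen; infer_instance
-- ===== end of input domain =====

-- B replaces A's fused loop (inline seen-set + early break) by a normalize pass and a
-- recursive budgeted emitter that dedupes against the already-processed prefix (objective: alternative).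

-- ===== PORT A =====
-- A's for-loop with its early `break`: state is (seen, lines); break returns lines at once.
def srLoop (rest : List (String × String)) (seen : PySem.Set (String × String))
    (lines : List String) (max_elems : Int) : List String :=
  match rest with
  | [] => lines
  | (t, s) :: rest =>
    let t2 := PySem.Str.strip (PySem.List.pyGetD ((PySem.Str.split? t ".").getD []) (-1) "")
    let key := (t2, s)
    if PySem.Set.contains seen key then
      srLoop rest seen lines max_elems
    else
      let seen' := PySem.Set.add seen key
      let lines' := lines ++ [if s ≠ "" then t2 ++ ": " ++ s else t2]
      if (lines'.length : Int) - 1 ≥ max_elems then lines'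
      else srLoop rest seen' lines' max_elems

def serialize_screen (pairs : List (String × String)) (max_elems : Int) : String :=
  PySem.Str.join "\n" (srLoop pairs PySem.Set.empty ["UI_SCREEN"] max_elems)

-- ===== PORT B =====
-- normalization of one pair: (t.split(".")[-1].strip(), s)
def ssNorm (p : String × String) : String × String :=
  (PySem.Str.strip (PySem.List.pyGetD ((PySem.Str.split? p.1 ".").getD []) (-1) ""), p.2)

-- f"{p[0]}: {p[1]}" if p[1] else p[0]
def ssFmt (q : String × String) : String :=
  if q.2 ≠ "" then q.1 ++ ": " ++ q.2 else q.1

-- Source B's `emit(i, budget)`: recursion over the remaining suffix of norm; the index i is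
-- represented by the already-processed prefix `pre` (= norm[:i]), against which `p in norm[:i]`
-- is tested by plain list membership.
def ssEmit (pre rest : List (String × String)) (budget : Int) : List String :=
  match rest with
  | [] => []
  | p :: rest' =>
    if budget ≤ 0 then []
    else if p ∈ pre then ssEmit (pre ++ [p]) rest' budget
    else ssFmt p :: ssEmit (pre ++ [p]) rest' (budget - 1)

def serialize_screen_alt (pairs : List (String × String)) (max_elems : Int) : String :=
  PySem.Str.join "\n" ("UI_SCREEN" :: ssEmit [] (pairs.map ssNorm) max_elems)

-- ===== PRECONDITION & SPEC =====
-- Pre_ excludes max_elems ≤ 0, a degenerate truncation bound on which A still returns: A's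
-- append-then-break check still emits the first deduped element there, an artefact of checking
-- the bound only after appending, while B's budget test naturally emits nothing — both values
-- are accidents of the respective mechanism and neither is specified behaviour.
def Pre_serialize_screen (pairs : List (String × String)) (max_elems : Int) : Prop :=
  1 ≤ max_elems
instance (pairs : List (String × String)) (max_elems : Int) : Decidable (Pre_serialize_screen pairs max_elems) := by unfold Pre_serialize_screen; infer_instance

def pvWitness_serialize_screen : (List (String × String)) × Int :=
  ([("android.widget.Button", "OK"), ("a.Button", "OK"), ("android.view.View", "")], 200)

def Spec_serialize_screen (pairs : List (String × String)) (max_elems : Int) (out : String) : Prop := out = serialize_screen_alt pairs max_elems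
instance (pairs : List (String × String)) (max_elems : Int) (out : String) : Decidable (Spec_serialize_screen pairs max_elems out) := by unfold Spec_serialize_screen; infer_instance

-- ===== CLAIM =====
def Claim_equal_serialize_screen : Prop := ∀ (pairs : List (String × String)) (max_elems : Int), Dom_serialize_screen pairs max_elems → Pre_serialize_screen pairs max_elems → Spec_serialize_screen pairs max_elems (serialize_screen pairs max_elems)

-- ===== LEMMAS AND PROOFS =====

-- ordered dedup of xs relative to an already-seen set (characterises both loops)
def pvDD (xs : List (String × String)) (seen : PySem.Set (String × String)) :
    List (String × String) :=
  match xs with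
  | [] => []
  | x :: xs =>
    if PySem.Set.contains seen x then pvDD xs seen
    else x :: pvDD xs (PySem.Set.add seen x)

-- A's loop, from any reachable state, appends the formatted remaining dedup, truncated to capacity
theorem srLoop_eq (rest : List (String × String)) (seen : PySem.Set (String × String))
    (lines : List String) (m : Int) (h : (lines.length : Int) - 1 < m) :
    srLoop rest seen lines m
      = lines ++ (List.take (m - ((lines.length : Int) - 1)).toNat
          (pvDD (rest.map ssNorm) seen)).map ssFmt := by
  induction rest generalizing seen lines with
  | nil => simp [srLoop, pvDD]
  | cons p rest ih =>
    obtain ⟨t, s⟩ := p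
    simp only [srLoop, List.map_cons, ssNorm, pvDD]
    generalize PySem.Str.strip (PySem.List.pyGetD ((PySem.Str.split? t ".").getD []) (-1) "") = t2
    by_cases hmem : (t2, s) ∈ seen
    · simp only [PySem.Set.contains_iff, hmem, if_true]
      exact ih seen lines h
    · simp only [PySem.Set.contains_iff, hmem, if_false]
      by_cases hbrk : ((lines ++ [if s ≠ "" then t2 ++ ": " ++ s else t2]).length : Int) - 1 ≥ m
      · have hlen : (lines ++ [if s ≠ "" then t2 ++ ": " ++ s else t2]).length
            = lines.length + 1 := by simp
        have hcap : (m - ((lines.length : Int) - 1)).toNat = 1 := by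
          rw [hlen] at hbrk; push_cast at hbrk; omega
        rw [if_pos hbrk, hcap]
        simp [ssFmt]
      · have hlen : (lines ++ [if s ≠ "" then t2 ++ ": " ++ s else t2]).length
            = lines.length + 1 := by simp
        have hlt : (((lines ++ [if s ≠ "" then t2 ++ ": " ++ s else t2]).length : Int)) - 1 < m := by
          omega
        rw [if_neg hbrk, ih (PySem.Set.add seen (t2, s)) _ hlt]
        have hcap : (m - (((lines ++ [if s ≠ "" then t2 ++ ": " ++ s else t2]).length : Int) - 1)).toNat + 1
            = (m - ((lines.length : Int) - 1)).toNat := by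
          rw [hlen] at hbrk ⊢; push_cast at hbrk ⊢; omega
        rw [← hcap]
        simp [ssFmt, List.take_succ_cons]

-- B's emitter is the formatted dedup (relative to the prefix seen so far), truncated to budget
theorem ssEmit_eq (rest pre : List (String × String)) (b : Int) :
    ssEmit pre rest b
      = (List.take b.toNat (pvDD rest (PySem.Set.ofList pre))).map ssFmt := by
  induction rest generalizing pre b with
  | nil => simp [ssEmit, pvDD]
  | cons p rest ih =>
    by_cases hb : b ≤ 0
    · have : b.toNat = 0 := by omega
      simp [ssEmit, hb, this]
    · have hof : PySem.Set.ofList (pre ++ [p]) = PySem.Set.add (PySem.Set.ofList pre) p := by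
        simp [PySem.Set.ofList_eq_foldl, List.foldl_append]
      by_cases hmem : p ∈ pre
      · have hmem' : p ∈ PySem.Set.ofList pre := by
          rw [PySem.Set.mem_ofList]; exact hmem
        rw [PySem.Set.add_of_mem hmem'] at hof
        simp only [ssEmit, hb, if_false, hmem, if_true, pvDD,
          PySem.Set.contains_iff, hmem', ih, hof]
      · have hmem' : ¬ p ∈ PySem.Set.ofList pre := by
          rw [PySem.Set.mem_ofList]; exact hmem
        have hcap : b.toNat = (b - 1).toNat + 1 := by omega
        simp only [ssEmit, hb, if_false, hmem, pvDD, PySem.Set.contains_iff, hmem', ih, hof]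
        rw [hcap, List.take_succ_cons, List.map_cons]

-- ===== VERDICT =====
theorem serialize_screen_spec : Claim_equal_serialize_screen := by
  intro pairs m _hdom hpre
  unfold Pre_serialize_screen at hpre
  unfold Spec_serialize_screen serialize_screen serialize_screen_alt
  rw [srLoop_eq pairs PySem.Set.empty ["UI_SCREEN"] m (by simpa using hpre)]
  rw [ssEmit_eq]
  have hc : (m - (((["UI_SCREEN"] : List String).length : Int) - 1)).toNat = m.toNat := by simp
  rw [hc]
  rfl
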